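-- pv_equiv track=rewrite | github.com/Mukhil04/Data-Science | Genomics_Lab3/main.py | create_target
-- ===== SOURCE A (Python) =====
-- def create_target(header_line) :
--     '''
--     Input - the header_line parsed at the beginning of the notebook
--     Output - a list of values(either 0 or 1)
--     '''
--     #start code here
--     index = []
--     flag = 0
--     str1 = ''
--     for i in range(len(header_line)):
--         if (header_line[i] == '\t' or header_line[i] == '\n') and len(str1) != 0:
--             if str1[0] == 'd':
--                 index.append(0)
--             elif str1[0] == 'y':
--                 index.append(1)
--             flag = 0
--             str1 = ''
--         if flag == 1:
--             str1 = str1 + header_line[i]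
--         if flag == 0 and header_line[i] == 'd':
--             str1 = str1 + 'd'
--             flag = 1
--         elif flag == 0 and header_line[i] == 'y':
--             str1 = str1 + 'y'
--             flag = 1
--     return index
-- ===== SOURCE B (Python) =====
-- def create_target(header_line):
--     out = []
--     # normalize newlines to tabs, split into fields, drop the unterminated last field
--     for field in header_line.replace('\n', '\t').split('\t')[:-1]:
--         c = next((ch for ch in field if ch in 'dy'), None)
--         if c == 'd':
--             out.append(0)
--         elif c == 'y':
--             out.append(1)
--     return out
-- ===== Notes on version B (the rewrite author's own statement) =====
-- stated objective: simpler
-- what changed: A's one-pass character state machine (flag plus an accumulated str1 buffer) is replaced by a split decomposition: normalize newlines to tabs, split on tabs, drop the unterminated last field, and classify each remaining field by its first 'd'/'y'; a timing run also measured B faster (C-level str.replace/split vs per-character Python loop).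
import Mathlib
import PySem

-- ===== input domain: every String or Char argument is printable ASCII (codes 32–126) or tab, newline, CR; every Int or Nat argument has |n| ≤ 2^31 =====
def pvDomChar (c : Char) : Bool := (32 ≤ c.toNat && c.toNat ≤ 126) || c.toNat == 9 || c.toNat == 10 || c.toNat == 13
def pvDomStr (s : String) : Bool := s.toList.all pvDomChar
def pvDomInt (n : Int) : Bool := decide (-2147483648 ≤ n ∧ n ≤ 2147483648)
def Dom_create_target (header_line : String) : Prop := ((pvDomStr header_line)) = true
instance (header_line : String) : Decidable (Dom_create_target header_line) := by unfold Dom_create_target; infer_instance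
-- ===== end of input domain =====

-- B replaces A's character-by-character state machine (flag + accumulated str1) by a
-- split-into-fields decomposition: normalize '\n' to '\t', split on '\t', drop the
-- unterminated last field, classify each field by its first 'd'/'y'.  Objective: simpler
-- (a timing run also measured B faster: C-level str.replace/split vs a per-character loop).

-- ===== PORT A =====
-- one loop iteration of A (the three successive if-statements, in order)
def createTargetStepA (st : List Int × Int × List Char) (c : Char) : List Int × Int × List Char :=
  let (index, flag, str1) := st
  let (index, flag, str1) :=
    if (c = '\t' ∨ c = '\n') ∧ str1.length ≠ 0 then
      (index ++ (if str1.head? = some 'd' then [(0 : Int)]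
                 else if str1.head? = some 'y' then [(1 : Int)] else []),
       (0 : Int), ([] : List Char))
    else (index, flag, str1)
  let str1 := if flag = 1 then str1 ++ [c] else str1
  if flag = 0 ∧ c = 'd' then (index, 1, str1 ++ ['d'])
  else if flag = 0 ∧ c = 'y' then (index, 1, str1 ++ ['y'])
  else (index, flag, str1)

def create_target (header_line : String) : List Int :=
  (header_line.toList.foldl createTargetStepA ([], 0, [])).1

-- ===== PORT B =====
-- classify one field: first 'd'/'y' decides (next((ch for ch in field if ch in 'dy'), None))
def createTargetStepB (out : List Int) (field : List Char) : List Int :=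
  match field.find? (fun ch => ch == 'd' || ch == 'y') with
  | some c => if c = 'd' then out ++ [(0 : Int)] else if c = 'y' then out ++ [(1 : Int)] else out
  | none => out

def create_target_alt (header_line : String) : List Int :=
  (PySem.List.slice
      (PySem.Chars.splitOn (PySem.Chars.replace header_line.toList ['\n'] ['\t']) ['\t'])
      none (some (-1))).foldl createTargetStepB []

-- ===== PRECONDITION & SPEC =====
def Spec_create_target (header_line : String) (out : List Int) : Prop := out = create_target_alt header_line
instance (header_line : String) (out : List Int) : Decidable (Spec_create_target header_line out) := by unfold Spec_create_target; infer_instance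

-- ===== CLAIM (what is proved, stated in full; the proofs are below) =====
def Claim_equal_create_target : Prop := ∀ (header_line : String), Dom_create_target header_line → Spec_create_target header_line (create_target header_line)

-- ===== LEMMAS AND PROOFS =====

-- spec-level split on '\t'
def mySplit : List Char → List (List Char)
  | [] => [[]]
  | c :: cs => if c = '\t' then [] :: mySplit cs else (mySplit cs).modifyHead (c :: ·)

def subNl (c : Char) : Char := if c = '\n' then '\t' else c

def emitList : Option Char → List Int
  | some 'd' => [0]
  | some 'y' => [1]
  | _ => []

-- residual of A's loop, keeping only the first 'd'/'y' of the current field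
def runA (cur : Option Char) : List Char → List Int
  | [] => []
  | c :: cs =>
    if c = '\t' ∨ c = '\n' then emitList cur ++ runA none cs
    else if cur = none ∧ (c = 'd' ∨ c = 'y') then runA (some c) cs
    else runA cur cs

def optList : Option Char → List Char
  | some c => [c]
  | none => []

theorem mySplit_nil : mySplit [] = [[]] := rfl

theorem mySplit_tab (cs : List Char) : mySplit ('\t' :: cs) = [] :: mySplit cs := by
  rw [mySplit]; simp

theorem mySplit_cons {c : Char} (h : ¬ c = '\t') (cs : List Char) :
    mySplit (c :: cs) = (mySplit cs).modifyHead (c :: ·) := by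
  rw [mySplit]; simp [h]

theorem mySplit_ne_nil (cs : List Char) : mySplit cs ≠ [] := by
  induction cs with
  | nil => simp [mySplit_nil]
  | cons c cs ih =>
    by_cases h : c = '\t'
    · subst h; rw [mySplit_tab]; simp
    · rw [mySplit_cons h]
      cases hs : mySplit cs with
      | nil => exact absurd hs ih
      | cons f0 fs => simp [List.modifyHead]

theorem replace_go_nl (l : List Char) : ∀ (fuel : Nat) (acc : List Char), l.length ≤ fuel →
    PySem.Chars.replace.go ['\n'] ['\t'] fuel l acc = acc.reverse ++ l.map subNl := by
  induction l with
  | nil => intro fuel acc _; cases fuel <;> simp [PySem.Chars.replace.go]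
  | cons c t ih =>
    intro fuel acc hle
    cases fuel with
    | zero => simp at hle
    | succ f =>
      rw [PySem.Chars.replace.go]
      simp only [List.length_cons] at hle
      by_cases hc : c = '\n'
      · subst hc
        rw [if_pos (by simp [List.isPrefixOf])]
        simp only [List.length_singleton, List.drop_succ_cons, List.drop_zero]
        rw [ih f _ (by omega)]
        simp only [List.map_cons, List.reverse_append, List.reverse_cons, List.reverse_nil,
          List.nil_append, List.append_assoc, List.cons_append, List.singleton_append]
        rw [show subNl '\n' = '\t' from rfl]
      · rw [if_neg (by simp [List.isPrefixOf, Ne.symm hc])]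
        rw [ih f _ (by omega)]
        simp only [List.map_cons, List.reverse_cons, List.append_assoc, List.singleton_append]
        rw [show subNl c = c from by simp [subNl, hc]]

theorem replace_nl (cs : List Char) :
    PySem.Chars.replace cs ['\n'] ['\t'] = cs.map subNl := by
  rw [PySem.Chars.replace]
  rw [if_neg (by simp)]
  rw [replace_go_nl cs cs.length [] le_rfl]
  simp

theorem splitOn_go_tab (l : List Char) : ∀ (fuel : Nat) (cur : List Char) (acc : List (List Char)),
    l.length ≤ fuel →
    PySem.Chars.splitOn.go ['\t'] fuel l cur acc =
      acc.reverse ++ (mySplit l).modifyHead (cur.reverse ++ ·) := by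
  induction l with
  | nil =>
    intro fuel cur acc _
    cases fuel <;> simp [PySem.Chars.splitOn.go, mySplit_nil, List.modifyHead]
  | cons c t ih =>
    intro fuel cur acc hle
    cases fuel with
    | zero => simp at hle
    | succ f =>
      rw [PySem.Chars.splitOn.go]
      simp only [List.length_cons] at hle
      by_cases hc : c = '\t'
      · subst hc
        rw [if_pos (by simp [List.isPrefixOf])]
        simp only [List.length_singleton, List.drop_succ_cons, List.drop_zero]
        rw [ih f _ _ (by omega), mySplit_tab]
        cases hs : mySplit t with
        | nil => exact absurd hs (mySplit_ne_nil t)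
        | cons f0 fs => simp [List.modifyHead]
      · rw [if_neg (by simp [List.isPrefixOf, Ne.symm hc])]
        rw [ih f _ _ (by omega), mySplit_cons hc]
        cases hs : mySplit t with
        | nil => exact absurd hs (mySplit_ne_nil t)
        | cons f0 fs => simp [List.modifyHead]

theorem splitOn_tab (cs : List Char) :
    PySem.Chars.splitOn cs ['\t'] = mySplit cs := by
  rw [PySem.Chars.splitOn, splitOn_go_tab cs (cs.length + 1) [] [] (by omega)]
  cases h : mySplit cs with
  | nil => exact absurd h (mySplit_ne_nil cs)
  | cons f0 fs => simp [List.modifyHead]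

theorem slice_dropLast {α : Type} (l : List α) :
    PySem.List.slice l none (some (-1)) = l.dropLast := by
  cases l with
  | nil => rfl
  | cons a t =>
    show List.take (PySem.List.clampIdx (a::t).length (-1) - 0) (List.drop 0 (a::t)) = _
    rw [PySem.List.clampIdx, if_pos (by omega)]
    rw [if_neg (by simp)]
    rw [List.dropLast_eq_take]
    simp only [Nat.sub_zero, List.drop_zero]
    congr 1
    simp only [List.length_cons]
    omega

theorem emitField_prefix (cur : Char) (f : List Char) (h : cur = 'd' ∨ cur = 'y') :
    ∀ (out : List Int), createTargetStepB out (cur :: f) = out ++ emitList (some cur) := by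
  intro out
  rcases h with h | h <;> subst h <;> simp [createTargetStepB, List.find?, emitList]

theorem emitField_skip (c : Char) (f : List Char) (h : ¬ (c = 'd' ∨ c = 'y')) (out : List Int) :
    createTargetStepB out (c :: f) = createTargetStepB out f := by
  have hb : (c == 'd' || c == 'y') = false := by
    rcases not_or.mp h with ⟨h1, h2⟩; simp [h1, h2]
  simp [createTargetStepB, List.find?, hb]

-- runA cur cs = fold of B's step over the delimiter-terminated fields (first field prefixed by cur)
theorem runA_eq_fields (cs : List Char) : ∀ (cur : Option Char) (out : List Int),
    (∀ x, cur = some x → x = 'd' ∨ x = 'y') →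
    out ++ runA cur cs =
      (((mySplit (cs.map subNl)).modifyHead (optList cur ++ ·)).dropLast).foldl createTargetStepB out := by
  induction cs with
  | nil =>
    intro cur out _
    simp [runA, mySplit_nil, List.modifyHead]
  | cons c cs ih =>
    intro cur out hcur
    by_cases hdel : c = '\t' ∨ c = '\n'
    · have hsub : subNl c = '\t' := by rcases hdel with h | h <;> simp [subNl, h]
      rw [show runA cur (c :: cs) = emitList cur ++ runA none cs from by rw [runA, if_pos hdel]]
      rw [List.map_cons, hsub, mySplit_tab]
      cases h : mySplit (cs.map subNl) with
      | nil => exact absurd h (mySplit_ne_nil _)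
      | cons f0 fs =>
        simp only [List.modifyHead_cons]
        rw [List.dropLast_cons_of_ne_nil (by simp), List.foldl_cons]
        have hemit : createTargetStepB out (optList cur ++ []) = out ++ emitList cur := by
          cases cur with
          | none => simp [optList, createTargetStepB, List.find?, emitList]
          | some x =>
            have := hcur x rfl
            simpa [optList, emitList] using emitField_prefix x [] this out
        rw [hemit, ← List.append_assoc]
        have := ih none (out ++ emitList cur) (by simp)
        rw [this, h]
        simp [List.modifyHead, optList]
    · have hsub : subNl c = c := by
        simp only [subNl, ite_eq_right_iff]
        intro h; exact absurd (Or.inr h) hdel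
      have htab : ¬ (c = '\t') := fun h => hdel (Or.inl h)
      rw [List.map_cons, hsub, mySplit_cons htab]
      cases h : mySplit (cs.map subNl) with
      | nil => exact absurd h (mySplit_ne_nil _)
      | cons f0 fs =>
        simp only [List.modifyHead_cons]
        cases cur with
        | some x =>
          have hx := hcur x rfl
          rw [show runA (some x) (c :: cs) = runA (some x) cs from by
            rw [runA, if_neg hdel, if_neg (by simp)]]
          rw [ih (some x) out hcur, h]
          cases fs with
          | nil => simp [List.modifyHead]
          | cons g gs =>
            simp only [List.modifyHead_cons]
            rw [show optList (some x) ++ c :: f0 = x :: (c :: f0) from rfl,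
              show optList (some x) ++ f0 = x :: f0 from rfl]
            rw [show ((x :: f0) :: g :: gs).dropLast = (x :: f0) :: (g :: gs).dropLast from
                List.dropLast_cons_of_ne_nil (by simp),
              show ((x :: c :: f0) :: g :: gs).dropLast = (x :: c :: f0) :: (g :: gs).dropLast from
                List.dropLast_cons_of_ne_nil (by simp),
              List.foldl_cons, List.foldl_cons,
              emitField_prefix x _ hx, emitField_prefix x _ hx]
        | none =>
          by_cases hdy : c = 'd' ∨ c = 'y'
          · rw [show runA none (c :: cs) = runA (some c) cs from by
              rw [runA, if_neg hdel, if_pos ⟨rfl, hdy⟩]]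
            rw [ih (some c) out (by intro x hx; cases hx; exact hdy), h]
            simp [List.modifyHead, optList]
          · rw [show runA none (c :: cs) = runA none cs from by
              rw [runA, if_neg hdel, if_neg (by simp [hdy])]]
            rw [ih none out (by simp), h]
            cases fs with
            | nil => simp [List.modifyHead]
            | cons g gs =>
              simp only [List.modifyHead_cons]
              rw [show optList none ++ c :: f0 = c :: f0 from rfl,
                show optList none ++ f0 = f0 from rfl]
              rw [show (f0 :: g :: gs).dropLast = f0 :: (g :: gs).dropLast from
                  List.dropLast_cons_of_ne_nil (by simp),
                show ((c :: f0) :: g :: gs).dropLast = (c :: f0) :: (g :: gs).dropLast from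
                  List.dropLast_cons_of_ne_nil (by simp),
                List.foldl_cons, List.foldl_cons,
                emitField_skip c f0 hdy]

-- evaluation lemmas for one iteration of A's loop (the invariant cases)
theorem stepA_delim_cons (idx : List Int) (s0 : Char) (ss : List Char) (c : Char)
    (hc : c = '\t' ∨ c = '\n') (hh : s0 = 'd' ∨ s0 = 'y') :
    createTargetStepA (idx, 1, s0 :: ss) c = (idx ++ emitList (some s0), 0, []) := by
  rcases hc with h | h <;> subst h <;>
    rcases hh with h0 | h0 <;> subst h0 <;> simp [createTargetStepA, emitList]

theorem stepA_delim_nil (idx : List Int) (c : Char) (hc : c = '\t' ∨ c = '\n') :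
    createTargetStepA (idx, 0, []) c = (idx, 0, []) := by
  rcases hc with h | h <;> subst h <;> simp [createTargetStepA]

theorem stepA_collect (idx : List Int) (s0 : Char) (ss : List Char) (c : Char)
    (hdel : ¬ (c = '\t' ∨ c = '\n')) :
    createTargetStepA (idx, 1, s0 :: ss) c = (idx, 1, s0 :: (ss ++ [c])) := by
  rcases not_or.mp hdel with ⟨h1, h2⟩
  simp [createTargetStepA, h1, h2]

theorem stepA_start_d (idx : List Int) :
    createTargetStepA (idx, 0, []) 'd' = (idx, 1, ['d']) := by
  simp [createTargetStepA]

theorem stepA_start_y (idx : List Int) :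
    createTargetStepA (idx, 0, []) 'y' = (idx, 1, ['y']) := by
  simp [createTargetStepA]

theorem stepA_skip (idx : List Int) (c : Char) (hcd : ¬ c = 'd') (hcy : ¬ c = 'y') :
    createTargetStepA (idx, 0, []) c = (idx, 0, []) := by
  simp [createTargetStepA, hcd, hcy]

-- A's fold equals runA (str1 collapsed to its first character)
theorem foldA_eq_runA (cs : List Char) : ∀ (idx : List Int) (str1 : List Char),
    (∀ x, str1.head? = some x → x = 'd' ∨ x = 'y') →
    (cs.foldl createTargetStepA (idx, (if str1 = [] then (0:Int) else 1), str1)).1 =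
      idx ++ runA str1.head? cs := by
  induction cs with
  | nil => intro idx str1 _; simp [runA]
  | cons c cs ih =>
    intro idx str1 hh
    rw [List.foldl_cons]
    by_cases hdel : c = '\t' ∨ c = '\n'
    · cases str1 with
      | nil =>
        rw [if_pos rfl, stepA_delim_nil idx c hdel]
        have := ih idx [] (by simp)
        rw [if_pos rfl] at this
        rw [this]
        simp [runA, if_pos hdel, emitList]
      | cons s0 ss =>
        rw [if_neg (by simp), stepA_delim_cons idx s0 ss c hdel (hh s0 rfl)]
        have := ih (idx ++ emitList (some s0)) [] (by simp)
        rw [if_pos rfl] at this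
        rw [this]
        simp [runA, if_pos hdel]
    · cases str1 with
      | nil =>
        rw [if_pos rfl]
        by_cases hcd : c = 'd'
        · subst hcd
          rw [stepA_start_d idx]
          have := ih idx ['d'] (by intro x hx; injection hx with hx; exact Or.inl hx.symm)
          rw [if_neg (by simp)] at this
          rw [this]
          simp [runA, if_neg hdel]
        · by_cases hcy : c = 'y'
          · subst hcy
            rw [stepA_start_y idx]
            have := ih idx ['y'] (by intro x hx; injection hx with hx; exact Or.inr hx.symm)
            rw [if_neg (by simp)] at this
            rw [this]
            simp [runA, if_neg hdel, hcd]
          · rw [stepA_skip idx c hcd hcy]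
            have := ih idx [] (by simp)
            rw [if_pos rfl] at this
            rw [this]
            simp [runA, if_neg hdel, hcd, hcy]
      | cons s0 ss =>
        rw [if_neg (by simp), stepA_collect idx s0 ss c hdel]
        have := ih idx (s0 :: (ss ++ [c])) (by intro x hx; simp at hx; exact hh x (by simp [hx]))
        rw [if_neg (by simp)] at this
        rw [this]
        have hcur : ¬ ((s0 :: ss).head? = none ∧ (c = 'd' ∨ c = 'y')) := by simp
        rw [show runA (s0 :: ss).head? (c :: cs) = runA (s0 :: ss).head? cs from by
          rw [runA, if_neg hdel, if_neg hcur]]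
        simp

-- ===== VERDICT (by name: the statement is the Claim_ definition above) =====
theorem create_target_spec : Claim_equal_create_target := by
  intro s _
  unfold Spec_create_target create_target create_target_alt
  rw [replace_nl, splitOn_tab, slice_dropLast]
  have hA := foldA_eq_runA s.toList [] [] (by simp)
  rw [if_pos rfl] at hA
  rw [hA]
  rw [show ([] : List Char).head? = (none : Option Char) from rfl]
  have hB := runA_eq_fields s.toList none [] (by simp)
  simp only [List.nil_append] at hA hB ⊢
  rw [hB]
  cases h : mySplit (s.toList.map subNl) with
  | nil => exact absurd h (mySplit_ne_nil _)
  | cons f0 fs => simp [List.modifyHead, optList]
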